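-- pv_equiv track=rewrite | github.com/wasimrehman05/superdoc | packages/sdk/langs/python/superdoc/runtime.py | _extract_envelope_candidates
-- ===== SOURCE A (Python) =====
-- def _extract_envelope_candidates(text: str) -> list:
--     """Build a list of JSON parse candidates from a CLI output stream."""
--     candidates: list = []
--     stripped = text.strip()
--     if not stripped:
--         return candidates
--     candidates.append(stripped)
--     lines = stripped.splitlines()
--     for index, line in enumerate(lines):
--         if not line.strip().startswith('{'):
--             continue
--         candidates.append('\n'.join(lines[index:]).strip())
--     return candidates
-- ===== SOURCE B (Python) =====
-- def _extract_envelope_candidates(text: str) -> list: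
--     """Build a list of JSON parse candidates from a CLI output stream."""
--     candidates: list = []
--     stripped = text.strip()
--     if not stripped:
--         return candidates
--     candidates.append(stripped)
--     lines = stripped.splitlines()
--     suffix = None
--     found = []
--     for line in reversed(lines):
--         suffix = line if suffix is None else line + '\n' + suffix
--         if line.strip().startswith('{'):
--             found.append(suffix.strip())
--     found.reverse()
--     candidates.extend(found)
--     return candidates
-- ===== Notes on version B (the rewrite author's own statement) =====
-- stated objective: alternative
-- what changed: Single reverse pass maintaining a running suffix accumulator (recording candidates when a line starts with '{', then reversing the record) instead of re-slicing lines[index:] and re-joining for each match in a forward enumerate loop.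
import Mathlib
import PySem

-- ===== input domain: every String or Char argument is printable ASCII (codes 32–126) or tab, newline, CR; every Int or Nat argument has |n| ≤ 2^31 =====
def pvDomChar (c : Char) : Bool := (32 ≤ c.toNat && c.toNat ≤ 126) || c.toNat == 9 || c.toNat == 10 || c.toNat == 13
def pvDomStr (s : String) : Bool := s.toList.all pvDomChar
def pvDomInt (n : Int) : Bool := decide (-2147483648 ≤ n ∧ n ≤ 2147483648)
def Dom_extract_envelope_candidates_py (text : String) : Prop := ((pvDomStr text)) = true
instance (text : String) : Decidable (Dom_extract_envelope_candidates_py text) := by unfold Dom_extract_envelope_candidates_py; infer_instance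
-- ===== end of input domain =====

-- B replaces A's per-match slice-and-join of lines[index:] by one reverse pass with a running
-- suffix accumulator (alternative decomposition; same return value).

set_option maxHeartbeats 1000000 in
-- keep: heartbeat budget for the final proofs
-- ===== PORT A =====
def extract_envelope_candidates_py (text : String) : List String :=
  let candidates : List String := []
  let stripped := PySem.Str.strip text
  if stripped = "" then candidates
  else
    let candidates := candidates ++ [stripped]
    let lines := PySem.Str.splitlines stripped
    (PySem.List.enumerate lines).foldl
      (fun acc il =>
        if PySem.Str.startswith (PySem.Str.strip il.2) "{" then
          acc ++ [PySem.Str.strip (PySem.Str.join "\n" (PySem.List.slice lines (some il.1) none))]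
        else acc)
      candidates

-- ===== PORT B =====
def extract_envelope_candidates_py_alt (text : String) : List String :=
  let candidates : List String := []
  let stripped := PySem.Str.strip text
  if stripped = "" then candidates
  else
    let candidates := candidates ++ [stripped]
    let lines := PySem.Str.splitlines stripped
    let st := lines.reverse.foldl
      (fun (st : Option String × List String) line =>
        let suffix := match st.1 with
          | none => line
          | some s => line ++ "\n" ++ s
        let found := if PySem.Str.startswith (PySem.Str.strip line) "{"
          then st.2 ++ [PySem.Str.strip suffix] else st.2
        (some suffix, found))
      (none, [])
    candidates ++ st.2.reverse

-- ===== PRECONDITION & SPEC =====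
def Spec_extract_envelope_candidates_py (text : String) (out : List String) : Prop := out = extract_envelope_candidates_py_alt text
instance (text : String) (out : List String) : Decidable (Spec_extract_envelope_candidates_py text out) := by unfold Spec_extract_envelope_candidates_py; infer_instance

-- ===== CLAIM (what is proved, stated in full; the proofs are below) =====
def Claim_equal_extract_envelope_candidates_py : Prop := ∀ (text : String), Dom_extract_envelope_candidates_py text → Spec_extract_envelope_candidates_py text (extract_envelope_candidates_py text)

-- ===== LEMMAS AND PROOFS =====

-- forward list of candidates: one (stripped join of the suffix) per line starting with '{'
def pvFw : List String → List String
  | [] => []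
  | a :: l => (if PySem.Str.startswith (PySem.Str.strip a) "{" = true
               then [PySem.Str.strip (PySem.Str.join "\n" (a :: l))] else []) ++ pvFw l

theorem pv_join_singleton (a : String) : PySem.Str.join "\n" [a] = a := by
  have h : (PySem.Str.join "\n" [a]).toList = a.toList := by
    simp [PySem.Str.toList_join, PySem.Chars.join_singleton]
  exact String.toList_inj.mp h

theorem pv_join_cons (a b : String) (l : List String) :
    PySem.Str.join "\n" (a :: b :: l) = a ++ "\n" ++ PySem.Str.join "\n" (b :: l) := by
  have h : (PySem.Str.join "\n" (a :: b :: l)).toList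
      = (a ++ "\n" ++ PySem.Str.join "\n" (b :: l)).toList := by
    simp [PySem.Str.toList_join, PySem.Chars.join_cons_cons]
  exact String.toList_inj.mp h

theorem pv_A_loop (full : List String) :
    ∀ (l : List String) (k : Nat) (init : List String), l = full.drop k →
    (PySem.List.enumerate l (k : Int)).foldl
      (fun acc il =>
        if PySem.Str.startswith (PySem.Str.strip il.2) "{" then
          acc ++ [PySem.Str.strip (PySem.Str.join "\n" (PySem.List.slice full (some il.1) none))]
        else acc)
      init = init ++ pvFw l := by
  intro l
  induction l with
  | nil => intro k init h; simp [PySem.List.enumerate_nil, pvFw]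
  | cons a l ih =>
    intro k init h
    rw [PySem.List.enumerate_cons, List.foldl_cons]
    have hs : PySem.List.slice full (some (k : Int)) none = a :: l := by
      rw [PySem.List.slice_from_natCast, ← h]
    have hl : l = full.drop (k + 1) := by
      rw [← List.drop_drop, ← h]; rfl
    have hk : (k : Int) + 1 = ((k + 1 : Nat) : Int) := by push_cast; ring
    rw [hk, ih (k + 1) _ hl]
    simp only [hs, pvFw]
    split_ifs <;> simp

set_option maxHeartbeats 2000000 in
theorem pv_B_loop (l : List String) :
    l.foldr
      (fun line (st : Option String × List String) =>
        let suffix := match st.1 with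
          | none => line
          | some s => line ++ "\n" ++ s
        let found := if PySem.Str.startswith (PySem.Str.strip line) "{"
          then st.2 ++ [PySem.Str.strip suffix] else st.2
        (some suffix, found))
      (none, []) =
    ((match l with | [] => none | a :: l' => some (PySem.Str.join "\n" (a :: l'))),
      (pvFw l).reverse) := by
  induction l with
  | nil => rfl
  | cons a l ih =>
    rw [List.foldr_cons, ih]
    cases l with
    | nil => simp only [pvFw, pv_join_singleton]; split_ifs <;> simp
    | cons b l' =>
      simp only [pvFw, pv_join_cons]
      split_ifs <;> simp

-- ===== VERDICT (by name: the statement is the Claim_ definition above) =====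
set_option maxHeartbeats 2000000 in
theorem extract_envelope_candidates_py_spec : Claim_equal_extract_envelope_candidates_py := by
  intro text _
  unfold Spec_extract_envelope_candidates_py extract_envelope_candidates_py extract_envelope_candidates_py_alt
  by_cases h : PySem.Str.strip text = ""
  · simp [h]
  · simp only [h, if_false, List.foldl_reverse]
    have hA := pv_A_loop (PySem.Str.splitlines (PySem.Str.strip text))
      (PySem.Str.splitlines (PySem.Str.strip text)) 0 ([] ++ [PySem.Str.strip text]) (by simp)
    rw [Nat.cast_zero] at hA
    rw [hA, pv_B_loop]
    simp
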